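-- pv_equiv track=rewrite | github.com/PantsuDango/Dango-Translator | ui/manga.py | dirFilesPathSort
-- ===== SOURCE A (Python) =====
-- def dirFilesPathSort(files) :
--
--     tmp_dict = {}
--     for file_path in files :
--         if len(file_path) not in tmp_dict :
--             tmp_dict[len(file_path)] = []
--         tmp_dict[len(file_path)].append(file_path)
--
--     new_files = []
--     for k in sorted(tmp_dict.keys()) :
--         for val in sorted(tmp_dict[k]) :
--             new_files.append(val)
--
--     return new_files
-- ===== SOURCE B (Python) =====
-- def dirFilesPathSort(files):
--     return sorted(files, key=lambda p: (len(p), p))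
-- ===== Notes on version B (the rewrite author's own statement) =====
-- stated objective: simpler
-- what changed: Replaces the length-bucketing dictionary plus per-bucket sorts and append loops with a single comparison sort over the tuple key (len(p), p).
import Mathlib
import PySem

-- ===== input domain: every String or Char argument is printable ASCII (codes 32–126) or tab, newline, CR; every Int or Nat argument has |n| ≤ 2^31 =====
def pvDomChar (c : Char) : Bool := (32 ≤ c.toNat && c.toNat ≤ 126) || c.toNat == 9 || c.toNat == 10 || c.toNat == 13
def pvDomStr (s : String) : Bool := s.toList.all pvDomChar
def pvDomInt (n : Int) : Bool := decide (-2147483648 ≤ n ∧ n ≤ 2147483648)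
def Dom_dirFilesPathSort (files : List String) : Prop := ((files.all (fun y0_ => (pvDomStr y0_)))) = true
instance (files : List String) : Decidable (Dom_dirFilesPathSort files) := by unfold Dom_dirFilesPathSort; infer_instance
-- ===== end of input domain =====

-- B replaces A's length-bucketing dictionary (bucket, sort keys, sort each bucket, append)
-- with one comparison sort over the tuple key (len(p), p); same result, simpler code.

-- ===== PORT A =====
def dirFilesPathSort (files : List String) : List String :=
  let tmp : PySem.Dict Int (List String) :=
    files.foldl (fun d fp =>
      let d' := if d.contains (PySem.Str.len fp) = true then d
                else d.insert (PySem.Str.len fp) []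
      d'.modify (PySem.Str.len fp) [] (fun l => l ++ [fp])) PySem.Dict.empty
  (PySem.List.sorted tmp.keys (fun k => k)).foldl
    (fun nf k =>
      (PySem.List.sorted (tmp.getD k []) (fun v => v)).foldl (fun nf v => nf ++ [v]) nf) []

-- ===== PORT B =====
def dirFilesPathSort_alt (files : List String) : List String :=
  PySem.List.sorted2 files (fun p => PySem.Str.len p) (fun p => p)

-- ===== PRECONDITION & SPEC =====
def Spec_dirFilesPathSort (files : List String) (out : List String) : Prop := out = dirFilesPathSort_alt files
instance (files : List String) (out : List String) : Decidable (Spec_dirFilesPathSort files out) := by unfold Spec_dirFilesPathSort; infer_instance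

-- ===== CLAIM (what is proved, stated in full; the proofs are below) =====
def Claim_equal_dirFilesPathSort : Prop := ∀ (files : List String), Dom_dirFilesPathSort files → Spec_dirFilesPathSort files (dirFilesPathSort files)

-- ===== LEMMAS AND PROOFS =====

-- The tuple sort key (len(p), p), as a lexicographic key.
def pvKey (p : String) : Lex (Int × String) := toLex (PySem.Str.len p, p)

theorem pvKey_injective : Function.Injective pvKey := by
  intro p q h
  exact congrArg (fun x => (ofLex x).2) h

-- sorted2 with the tuple key (k1, k2) is sorted with the corresponding lexicographic key.
theorem sorted2_eq_sorted_toLex {α κ₁ κ₂ : Type} [LinearOrder κ₁] [LinearOrder κ₂]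
    (xs : List α) (k1 : α → κ₁) (k2 : α → κ₂) :
    PySem.List.sorted2 xs k1 k2 = PySem.List.sorted xs (fun x => toLex (k1 x, k2 x)) := by
  unfold PySem.List.sorted2 PySem.List.sorted
  have hbef : (fun a b => decide (k1 a < k1 b) || (!decide (k1 b < k1 a) && decide (k2 a < k2 b)))
      = (fun a b => decide (toLex (k1 a, k2 a) < toLex (k1 b, k2 b))) := by
    funext a b
    refine Bool.eq_iff_iff.mpr ?_
    simp only [Bool.or_eq_true, Bool.and_eq_true, Bool.not_eq_true', decide_eq_true_eq,
      decide_eq_false_iff_not, Prod.Lex.lt_iff, ofLex_toLex]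
    constructor
    · rintro (h | ⟨h1, h2⟩)
      · exact Or.inl h
      · rcases lt_trichotomy (k1 a) (k1 b) with h' | h' | h'
        · exact Or.inl h'
        · exact Or.inr ⟨h', h2⟩
        · exact absurd h' h1
    · rintro (h | ⟨h1, h2⟩)
      · exact Or.inl h
      · exact Or.inr ⟨by simp [h1], h2⟩
  simp only [hbef]
  simp

-- A's per-element step (the 'if the key is new, insert []' followed by the append) is a plain 'modify'.
theorem pvStep_eq (d : PySem.Dict Int (List String)) (fp : String) :
    (if d.contains (PySem.Str.len fp) = true then d
     else d.insert (PySem.Str.len fp) []).modify (PySem.Str.len fp) [] (fun l => l ++ [fp])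
    = d.modify (PySem.Str.len fp) [] (fun l => l ++ [fp]) := by
  by_cases h : d.contains (PySem.Str.len fp) = true
  · rw [if_pos h]
  · rw [if_neg h]
    simp only [PySem.Dict.modify, PySem.Dict.getD_insert_self, PySem.Dict.insert_insert_self]
    rw [PySem.Dict.getD_of_not_contains d [] (by simpa using h)]

-- The dictionary A builds, as one modify loop.
def pvTmp (files : List String) : PySem.Dict Int (List String) :=
  files.foldl (fun d fp => d.modify (PySem.Str.len fp) [] (fun l => l ++ [fp])) PySem.Dict.empty

theorem pvTmp_keys (files : List String) :
    (pvTmp files).keys = PySem.Set.ofList (files.map PySem.Str.len) := by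
  unfold pvTmp
  rw [PySem.Dict.keys_foldl_modify_key files (fun fp => PySem.Str.len fp) []
    (fun _ fp => fun l => l ++ [fp]) PySem.Dict.empty]
  rfl

theorem pvTmp_getD (files : List String) (k : Int) :
    (pvTmp files).getD k [] = files.filter (fun p => PySem.Str.len p == k) := by
  unfold pvTmp
  rw [show files.foldl (fun d fp => d.modify (PySem.Str.len fp) [] (fun l => l ++ [fp])) PySem.Dict.empty
      = (files.map (fun p => (PySem.Str.len p, p))).foldl
          (fun d q => d.modify q.1 [] (fun l => l ++ [q.2])) PySem.Dict.empty from
    (List.foldl_map (f := fun p => (PySem.Str.len p, p))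
      (g := fun (d : PySem.Dict Int (List String)) q =>
        d.modify q.1 [] (fun l => l ++ [q.2]))).symm]
  rw [PySem.Dict.getD_foldl_modify_append]
  simp [List.filter_map, Function.comp_def]

-- A is 'for each distinct length in increasing order, the sorted bucket of that length'.
theorem pvA_eq_flatMap (files : List String) :
    dirFilesPathSort files
    = (PySem.List.sorted (PySem.Set.ofList (files.map PySem.Str.len)) (fun k => k)).flatMap
        (fun k => PySem.List.sorted (files.filter (fun p => PySem.Str.len p == k)) (fun v => v)) := by
  unfold dirFilesPathSort
  have htmp : files.foldl (fun d fp =>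
      (if d.contains (PySem.Str.len fp) = true then d
       else d.insert (PySem.Str.len fp) []).modify (PySem.Str.len fp) [] (fun l => l ++ [fp]))
      PySem.Dict.empty = pvTmp files := by
    unfold pvTmp
    exact PySem.List.foldl_congr_mem files _ _ PySem.Dict.empty (fun d fp _ => pvStep_eq d fp)
  simp only [htmp, pvTmp_keys]
  rw [PySem.List.foldl_congr_mem _ _ (fun nf k =>
        nf ++ PySem.List.sorted (files.filter (fun p => PySem.Str.len p == k)) (fun v => v)) []
      (by intro nf k _
          rw [PySem.List.foldl_append_singleton_eq_self, pvTmp_getD])]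
  rw [PySem.List.foldl_append_eq_flatMap]
  rfl

-- count of a string in one length bucket
theorem pvCount_bucket (files : List String) (a : String) (k : Int) :
    (files.filter (fun p => PySem.Str.len p == k)).count a
    = if PySem.Str.len a == k then files.count a else 0 := by
  by_cases h : PySem.Str.len a = k
  · rw [if_pos (by simpa using h), List.count_filter (by simpa using h)]
  · rw [if_neg (by simpa using h), List.count_eq_zero]
    intro hmem
    exact h (by simpa using (List.mem_filter.mp hmem).2)

-- sum over a nodup key list of 'the bucket at k' counts
theorem pvSum_map_ite (K : List Int) (hnd : K.Nodup) (x : Int) (c : Nat) :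
    (K.map (fun k => if x == k then c else 0)).sum = if x ∈ K then c else 0 := by
  induction K with
  | nil => simp
  | cons k K ih =>
    rcases List.nodup_cons.mp hnd with ⟨hk, hnd'⟩
    by_cases hx : x = k
    · subst hx
      have hz : (K.map (fun j => if x == j then c else 0)).sum = 0 := by
        apply List.sum_eq_zero
        intro n hn
        obtain ⟨j, hj, rfl⟩ := List.mem_map.mp hn
        have hne : ¬ (x == j) = true := by
          simp only [beq_iff_eq]
          intro h
          exact hk (h ▸ hj)
        rw [if_neg hne]
      rw [List.map_cons, List.sum_cons, if_pos (by simp), hz, add_zero,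
        if_pos (List.mem_cons_self)]
    · rw [List.map_cons, List.sum_cons, if_neg (by simpa using hx), ih hnd', zero_add]
      simp [List.mem_cons, hx]

theorem pvA_perm (files : List String) : (dirFilesPathSort files).Perm files := by
  rw [pvA_eq_flatMap, List.perm_iff_count]
  intro a
  rw [List.flatMap_def, List.count_flatten, List.map_map]
  have hcongr : ∀ L : List Int,
      L.map (List.count a ∘ fun k =>
        PySem.List.sorted (files.filter (fun p => PySem.Str.len p == k)) (fun v => v))
      = L.map (fun k => if PySem.Str.len a == k then files.count a else 0) := by
    intro L
    apply List.map_congr_left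
    intro k _
    simp only [Function.comp_apply]
    rw [(PySem.List.sorted_perm _ _ _).count_eq, pvCount_bucket]
  rw [hcongr]
  have hnd : (PySem.List.sorted (PySem.Set.ofList (files.map PySem.Str.len)) (fun k => k)).Nodup :=
    (PySem.List.sorted_perm _ _ _).symm.nodup (PySem.Set.nodup_ofList _)
  rw [pvSum_map_ite _ hnd]
  by_cases ha : a ∈ files
  · rw [if_pos]
    rw [PySem.List.mem_sorted, PySem.Set.mem_ofList]
    exact List.mem_map.mpr ⟨a, ha, rfl⟩
  · rw [List.count_eq_zero.mpr ha]
    simp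

theorem pvA_pairwise (files : List String) :
    (dirFilesPathSort files).Pairwise (fun a b => pvKey a ≤ pvKey b) := by
  rw [pvA_eq_flatMap, List.pairwise_flatMap]
  constructor
  · intro k _
    refine (PySem.List.sorted_pairwise (files.filter (fun p => PySem.Str.len p == k))
      (fun v => v)).imp_of_mem ?_
    intro a b ha hb hab
    have hak : PySem.Str.len a = k := by
      simpa using (List.mem_filter.mp ((PySem.List.mem_sorted _ _ _ _).mp ha)).2
    have hbk : PySem.Str.len b = k := by
      simpa using (List.mem_filter.mp ((PySem.List.mem_sorted _ _ _ _).mp hb)).2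
    rw [pvKey, pvKey, Prod.Lex.le_iff]
    refine Or.inr ⟨?_, hab⟩
    show PySem.Str.len a = PySem.Str.len b
    rw [hak, hbk]
  · refine (PySem.List.sorted_ofList_pairwise_lt (files.map PySem.Str.len)).imp ?_
    intro k₁ k₂ hlt x hx y hy
    have hxk : PySem.Str.len x = k₁ := by
      simpa using (List.mem_filter.mp ((PySem.List.mem_sorted _ _ _ _).mp hx)).2
    have hyk : PySem.Str.len y = k₂ := by
      simpa using (List.mem_filter.mp ((PySem.List.mem_sorted _ _ _ _).mp hy)).2
    rw [pvKey, pvKey, Prod.Lex.le_iff]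
    refine Or.inl ?_
    show PySem.Str.len x < PySem.Str.len y
    rw [hxk, hyk]
    exact hlt

theorem pvB_eq_sorted (files : List String) :
    dirFilesPathSort_alt files = PySem.List.sorted files pvKey := by
  unfold dirFilesPathSort_alt
  rw [sorted2_eq_sorted_toLex]
  rfl

-- ===== VERDICT (by name: the statement is the Claim_ definition above) =====
theorem dirFilesPathSort_spec : Claim_equal_dirFilesPathSort := by
  intro files _
  unfold Spec_dirFilesPathSort
  rw [pvB_eq_sorted]
  exact PySem.List.eq_of_perm_of_pairwise_le_of_injective pvKey pvKey_injective
    ((pvA_perm files).trans (PySem.List.sorted_perm files pvKey false).symm)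
    (pvA_pairwise files)
    (PySem.List.sorted_pairwise files pvKey)
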